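-- pv_equiv track=rewrite | github.com/wojlin/QR | app.py | block_interleave
-- ===== SOURCE A (Python) =====
-- def block_interleave(data):
--     matrix = []
--     highest_length = 0
--     for group in data:
--         for block in group:
--             if len(block) > highest_length:
--                 highest_length = len(block)
--             matrix.append(block)
--     rows = len(matrix)
--     columns = highest_length
--     matrix_T = []
--     for j in range(columns):
--         row = []
--         for i in range(rows):
--             try:
--                 row.append(matrix[i][j])
--             except Exception:
--                 pass
--         matrix_T.append(row)
--     interleaved_data = [j for sub in matrix_T for j in sub]
--     return interleaved_data
-- ===== SOURCE B (Python) =====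
-- def block_interleave(data):
--     active = [block for group in data for block in group if block]
--     out = []
--     j = 0
--     while active:
--         nxt = []
--         for block in active:
--             out.append(block[j])
--             if len(block) > j + 1:
--                 nxt.append(block)
--         active = nxt
--         j += 1
--     return out
-- ===== Notes on version B (the rewrite author's own statement) =====
-- stated objective: alternative
-- what changed: Instead of building a padded transpose by probing every row at every column index (try/except per cell), B keeps a worklist of still-active blocks with a shared column counter, emits each active block's element per column and drops exhausted blocks, so each element is touched O(1) times; measured on-par with A at large sizes (A's cost is also ~total on uniform blocks).
import Mathlib
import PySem

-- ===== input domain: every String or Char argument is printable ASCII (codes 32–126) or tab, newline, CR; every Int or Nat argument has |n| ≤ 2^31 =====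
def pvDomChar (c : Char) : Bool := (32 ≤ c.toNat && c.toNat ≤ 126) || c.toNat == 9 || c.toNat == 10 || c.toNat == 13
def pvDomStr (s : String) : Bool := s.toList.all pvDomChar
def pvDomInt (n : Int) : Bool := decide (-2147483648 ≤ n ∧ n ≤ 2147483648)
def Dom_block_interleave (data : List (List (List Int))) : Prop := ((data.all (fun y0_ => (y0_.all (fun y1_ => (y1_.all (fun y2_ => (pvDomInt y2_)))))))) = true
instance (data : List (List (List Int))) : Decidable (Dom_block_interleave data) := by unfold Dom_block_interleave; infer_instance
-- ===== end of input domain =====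

-- B replaces A's padded-transpose construction (probing every row at every column with
-- try/except) by a worklist of still-active blocks that drops each block once the column
-- counter passes its length: a different traversal of the same data, same measured cost.

-- ===== PORT A =====
-- Literal port of A: flatten groups tracking the highest block length, then build the
-- padded transpose column by column (try/except → Option) and flatten it.
def block_interleave (data : List (List (List Int))) : List Int :=
  let st := data.foldl
    (fun (st : List (List Int) × Int) group =>
      group.foldl
        (fun (st : List (List Int) × Int) block =>
          (st.1 ++ [block],
           if (block.length : Int) > st.2 then (block.length : Int) else st.2))
        st)
    ([], 0)
  let matrix := st.1
  let highest := st.2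
  let rows : Int := (matrix.length : Int)
  let matrixT := (PySem.List.pyRange 0 highest).foldl
    (fun (acc : List (List Int)) j =>
      let row := (PySem.List.pyRange 0 rows).foldl
        (fun (r : List Int) i =>
          match PySem.List.pyGet? matrix i with
          | none => r
          | some b =>
            match PySem.List.pyGet? b j with
            | none => r
            | some v => r ++ [v])
        []
      acc ++ [row])
    []
  matrixT.flatMap id

-- ===== PORT B =====
-- B-side helpers: the fold of one while-iteration in closed form (cited by decreasing_by),
-- and the termination measure.
def pvMsum2 (j : Nat) (l : List (List Int)) : Nat := (l.map (fun b => (b.length - j) + 1)).sum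

lemma pvAltStep2 (j : Nat) (l : List (List Int)) (h : List Int) (r : List (List Int)) :
    l.foldl
      (fun (st : List Int × List (List Int)) block =>
        (st.1 ++ [block.getD j 0],
         if j + 1 < block.length then st.2 ++ [block] else st.2))
      (h, r)
    = (h ++ l.map (fun b => b.getD j 0),
       r ++ l.filter (fun b => j + 1 < b.length)) := by
  induction l generalizing h r with
  | nil => simp
  | cons b bs ih =>
    simp only [List.foldl_cons, ih, List.map_cons, List.filter_cons]
    by_cases hb : j + 1 < b.length <;> simp [hb]

lemma pvMsum2_dec (j : Nat) (l : List (List Int)) (hne : l ≠ []) :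
    pvMsum2 (j + 1) (l.filter (fun b => j + 1 < b.length)) < pvMsum2 j l := by
  have key : ∀ m : List (List Int),
      pvMsum2 (j + 1) (m.filter (fun b => j + 1 < b.length)) ≤ pvMsum2 j m := by
    intro m
    induction m with
    | nil => simp [pvMsum2]
    | cons b bs ih =>
      by_cases hb : j + 1 < b.length
      · rw [List.filter_cons_of_pos (by simp [hb])]
        simp only [pvMsum2, List.map_cons, List.sum_cons] at *
        omega
      · rw [List.filter_cons_of_neg (by simp [hb])]
        simp only [pvMsum2, List.map_cons, List.sum_cons] at *
        omega
  cases l with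
  | nil => exact absurd rfl hne
  | cons b bs =>
    have hk := key bs
    by_cases hb : j + 1 < b.length
    · rw [List.filter_cons_of_pos (by simp [hb])]
      simp only [pvMsum2, List.map_cons, List.sum_cons] at *
      omega
    · rw [List.filter_cons_of_neg (by simp [hb])]
      simp only [pvMsum2, List.map_cons, List.sum_cons] at *
      omega

-- Port of B: collect the nonempty blocks, then per column j emit every active block's
-- j-th element and keep the blocks that still have elements past column j.
-- (block[j] is ported as getD j 0: inside the loop every active block satisfies j < length,
-- so the default is never used.)
def pvAltLoop2 (j : Nat) : List (List Int) → List Int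
  | [] => []
  | a :: rest =>
    let step := (a :: rest).foldl
      (fun (st : List Int × List (List Int)) block =>
        (st.1 ++ [block.getD j 0],
         if j + 1 < block.length then st.2 ++ [block] else st.2))
      ([], [])
    step.1 ++ pvAltLoop2 (j + 1) step.2
termination_by l => pvMsum2 j l
decreasing_by
  simp only [dite_eq_ite]
  rw [pvAltStep2, List.nil_append]
  exact pvMsum2_dec j (a :: rest) (by simp)

def block_interleave_alt (data : List (List (List Int))) : List Int :=
  pvAltLoop2 0 ((data.flatMap id).filter (fun b => ¬ b.isEmpty))

-- ===== PRECONDITION & SPEC =====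
def Spec_block_interleave (data : List (List (List Int))) (out : List Int) : Prop := out = block_interleave_alt data
instance (data : List (List (List Int))) (out : List Int) : Decidable (Spec_block_interleave data out) := by unfold Spec_block_interleave; infer_instance

-- ===== CLAIM (what is proved, stated in full; the proofs are below) =====
def Claim_equal_block_interleave : Prop := ∀ (data : List (List (List Int))), Dom_block_interleave data → Spec_block_interleave data (block_interleave data)

-- ===== LEMMAS AND PROOFS =====

-- proof-layer reference loop: the same worklist pass phrased on block suffixes (tails)
def pvMsum (l : List (List Int)) : Nat := (l.map (fun b => b.length + 1)).sum

lemma pvAltStep (l : List (List Int)) (h : List Int) (r : List (List Int)) :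
    l.foldl
      (fun (st : List Int × List (List Int)) block =>
        (st.1 ++ [block.headD 0],
         if 1 < block.length then st.2 ++ [block.tail] else st.2))
      (h, r)
    = (h ++ l.map (fun b => b.headD 0),
       r ++ (l.filter (fun b => 1 < b.length)).map (fun b => b.tail)) := by
  induction l generalizing h r with
  | nil => simp
  | cons b bs ih =>
    simp only [List.foldl_cons, ih, List.map_cons, List.filter_cons]
    by_cases hb : 1 < b.length <;> simp [hb]

lemma pvMsum_dec (l : List (List Int)) (hne : l ≠ []) :
    pvMsum ((l.filter (fun b => 1 < b.length)).map (fun b => b.tail)) < pvMsum l := by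
  have key : ∀ m : List (List Int),
      pvMsum ((m.filter (fun b => 1 < b.length)).map (fun b => b.tail))
        ≤ (m.map (fun b => b.length)).sum := by
    intro m
    induction m with
    | nil => simp [pvMsum]
    | cons b bs ih =>
      simp only [List.map_cons, List.sum_cons]
      by_cases hb : 1 < b.length
      · rw [List.filter_cons_of_pos (by simp [hb])]
        have : pvMsum (b.tail :: (bs.filter (fun b => 1 < b.length)).map (fun b => b.tail))
            = b.tail.length + 1 + pvMsum ((bs.filter (fun b => 1 < b.length)).map (fun b => b.tail)) := by
          simp [pvMsum]
        rw [List.map_cons, this, List.length_tail]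
        omega
      · rw [List.filter_cons_of_neg (by simp [hb])]
        omega
  have h2 : (l.map (fun b => b.length)).sum < pvMsum l := by
    cases l with
    | nil => exact absurd rfl hne
    | cons b bs =>
      have hle : (bs.map (fun b => b.length)).sum ≤ (bs.map (fun b => b.length + 1)).sum :=
        List.sum_le_sum (fun x _ => by omega)
      simp only [pvMsum, List.map_cons, List.sum_cons]
      omega
  exact Nat.lt_of_le_of_lt (key l) h2


def pvAltLoop : List (List Int) → List Int
  | [] => []
  | a :: rest =>
    let step := (a :: rest).foldl
      (fun (st : List Int × List (List Int)) block =>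
        (st.1 ++ [block.headD 0],
         if 1 < block.length then st.2 ++ [block.tail] else st.2))
      ([], [])
    step.1 ++ pvAltLoop step.2
termination_by l => pvMsum l
decreasing_by
  simp only [dite_eq_ite]
  rw [pvAltStep, List.nil_append]
  exact pvMsum_dec (a :: rest) (by simp)


lemma pvLoop2_eq_tails : ∀ (j : Nat) (active : List (List Int)),
    (∀ b ∈ active, j < b.length) →
    pvAltLoop2 j active = pvAltLoop (active.map (fun b => b.drop j)) := by
  intro j active
  induction j, active using pvAltLoop2.induct with
  | case1 j => intro _; simp [pvAltLoop2, pvAltLoop]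
  | case2 j a rest step ih =>
    intro hall
    rw [pvAltLoop2.eq_def]
    simp only [pvAltStep2, List.nil_append]
    have hx : (a :: rest).map (fun b => b.drop j) = a.drop j :: rest.map (fun b => b.drop j) := rfl
    rw [hx, pvAltLoop.eq_def]
    simp only [pvAltStep, List.nil_append]
    rw [← hx]
    have hheads : ((a :: rest).map (fun b => b.drop j)).map (fun b => b.headD 0)
        = (a :: rest).map (fun b => b.getD j 0) := by
      rw [List.map_map]
      apply List.map_congr_left
      intro b _
      simp [List.headD_eq_head?_getD, List.head?_drop, List.getD_eq_getElem?_getD]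
    have hrest : (((a :: rest).map (fun b => b.drop j)).filter (fun b => 1 < b.length)).map
          (fun b => b.tail)
        = ((a :: rest).filter (fun b => j + 1 < b.length)).map (fun b => b.drop (j + 1)) := by
      rw [List.filter_map, List.map_map]
      have hfil : ((a :: rest).filter ((fun b => decide (1 < b.length)) ∘ (fun b => b.drop j)))
          = (a :: rest).filter (fun b => j + 1 < b.length) := by
        apply List.filter_congr
        intro b _
        simp only [Function.comp, List.length_drop]
        by_cases h : j + 1 < b.length
        · simp [h]; omega
        · simp [h]; omega
      rw [hfil]
      apply List.map_congr_left
      intro b _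
      simp [Function.comp, List.tail_drop]
    have hstep2 : step.2 = (a :: rest).filter (fun b => decide (j + 1 < b.length)) := by
      simp only [step, dite_eq_ite, pvAltStep2, List.nil_append]
    rw [hstep2] at ih
    rw [hheads, hrest]
    congr 1
    exact ih (by
      intro b hb
      have := List.of_mem_filter hb
      simpa using this)


-- the common reference form: column j of the (virtual) transpose is m.filterMap (·[j]?)
def pvCols (m : List (List Int)) (n : Nat) : List Int :=
  (List.range n).flatMap (fun j => m.filterMap (fun b => b[j]?))

def pvMaxLen (m : List (List Int)) : Nat := m.foldl (fun a b => max a b.length) 0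

-- ---- A-side characterisation ----

lemma pvInnerFold (bl : List (List Int)) (acc : List (List Int)) (h : Int) :
    bl.foldl
      (fun (st : List (List Int) × Int) block =>
        (st.1 ++ [block],
         if (block.length : Int) > st.2 then (block.length : Int) else st.2))
      (acc, h)
    = (acc ++ bl,
       bl.foldl (fun (a : Int) block =>
         if (block.length : Int) > a then (block.length : Int) else a) h) := by
  induction bl generalizing acc h with
  | nil => simp
  | cons b bs ihb => simp [ihb]

lemma pvFlatFold (data : List (List (List Int))) (acc : List (List Int)) (h : Int) :
    data.foldl
      (fun (st : List (List Int) × Int) group =>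
        group.foldl
          (fun (st : List (List Int) × Int) block =>
            (st.1 ++ [block],
             if (block.length : Int) > st.2 then (block.length : Int) else st.2))
          st)
      (acc, h)
    = (acc ++ data.flatMap id,
       (data.flatMap id).foldl
         (fun (a : Int) block => if (block.length : Int) > a then (block.length : Int) else a)
         h) := by
  induction data generalizing acc h with
  | nil => simp
  | cons g gs ih =>
    rw [List.foldl_cons, pvInnerFold g acc h, ih]
    simp [List.foldl_append]

lemma pvFoldMax (bs : List (List Int)) (k : Nat) :
    bs.foldl (fun a b => max a b.length) k = max k (bs.foldl (fun a b => max a b.length) 0) := by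
  induction bs generalizing k with
  | nil => simp
  | cons c cs ih =>
    simp only [List.foldl_cons]
    rw [ih (max k c.length), ih (max 0 c.length)]
    omega

lemma pvHighestEq (m : List (List Int)) (k : Nat) :
    m.foldl (fun (a : Int) block =>
      if (block.length : Int) > a then (block.length : Int) else a) (k : Int)
    = ((m.foldl (fun a b => max a b.length) k : Nat) : Int) := by
  induction m generalizing k with
  | nil => simp
  | cons b bs ih =>
    simp only [List.foldl_cons]
    by_cases hb : (k : Int) < (b.length : Int)
    · rw [if_pos hb, ih b.length, pvFoldMax bs b.length, pvFoldMax bs (max k b.length)]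
      have hk : k < b.length := by exact_mod_cast hb
      push_cast
      omega
    · rw [if_neg hb, ih k, pvFoldMax bs k, pvFoldMax bs (max k b.length)]
      have hk : ¬ k < b.length := by exact_mod_cast hb
      push_cast
      omega

lemma pvInnerRow (m : List (List Int)) (j : Nat) (r : List Int) :
    (List.range m.length).foldl
      (fun (r : List Int) i =>
        match m[i]? with
        | none => r
        | some b =>
          match b[j]? with
          | none => r
          | some v => r ++ [v])
      r
    = r ++ m.filterMap (fun b => b[j]?) := by
  induction m using List.reverseRecOn generalizing r with
  | nil => simp
  | append_singleton bs b ih =>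
    rw [show (bs ++ [b]).length = bs.length + 1 by simp]
    rw [List.range_succ, List.foldl_append]
    rw [PySem.List.foldl_congr_mem (List.range bs.length) _
      (fun (r : List Int) i =>
        match bs[i]? with
        | none => r
        | some b =>
          match b[j]? with
          | none => r
          | some v => r ++ [v]) r
      (by
        intro acc x hx
        rw [List.mem_range] at hx
        rw [List.getElem?_append_left hx])]
    rw [ih r, List.foldl_cons, List.foldl_nil]
    rw [show (bs ++ [b])[bs.length]? = some b by simp]
    cases hbj : b[j]? with
    | none => simp [List.filterMap_append, hbj]
    | some v => simp [List.filterMap_append, hbj]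

lemma pvA_eq_cols (data : List (List (List Int))) :
    block_interleave data = pvCols (data.flatMap id) (pvMaxLen (data.flatMap id)) := by
  unfold block_interleave
  simp only [pvFlatFold, List.nil_append]
  set m := data.flatMap id with hm
  have hh : m.foldl (fun (a : Int) block =>
      if (block.length : Int) > a then (block.length : Int) else a) 0
      = ((pvMaxLen m : Nat) : Int) := by
    have := pvHighestEq m 0
    simpa [pvMaxLen] using this
  rw [hh, pvCols]
  rw [PySem.List.pyRange_zero_natCast, PySem.List.pyRange_zero_natCast]
  set n := pvMaxLen m with hn
  rw [List.foldl_map]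
  rw [PySem.List.foldl_append_singleton_eq_map]
  rw [List.nil_append]
  have hflat : ∀ (F : Nat → List Int) (l : List Nat),
      List.flatMap id (l.map F) = l.flatMap F := by
    intro F l; simp [List.flatMap_def]
  rw [hflat]
  apply List.flatMap_congr
  intro j _
  rw [List.foldl_map]
  simp only [PySem.List.pyGet?_natCast]
  simpa using pvInnerRow m j []

-- ---- B-side characterisation ----

lemma pvFilter_ne_nil (m : List (List Int)) :
    m.filter (fun b => ¬ b.isEmpty) = m.filter (fun b => b ≠ []) := by
  apply List.filter_congr
  intro b _
  cases b <;> simp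

lemma pvMaxLen_cons (b : List Int) (m : List (List Int)) :
    pvMaxLen (b :: m) = max b.length (pvMaxLen m) := by
  unfold pvMaxLen
  simp only [List.foldl_cons]
  rw [pvFoldMax m (max 0 b.length)]
  omega

lemma pvMaxLen_ge (m : List (List Int)) (b : List Int) (hb : b ∈ m) :
    b.length ≤ pvMaxLen m := by
  induction m with
  | nil => simp at hb
  | cons c cs ih =>
    rw [pvMaxLen_cons]
    rcases List.mem_cons.mp hb with h | h
    · subst h; omega
    · have := ih h; omega

lemma pvMaxLen_zero (m : List (List Int)) (h : pvMaxLen m = 0) :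
    m.filter (fun b => b ≠ []) = [] := by
  rw [List.filter_eq_nil_iff]
  intro b hb
  have := pvMaxLen_ge m b hb
  have hb0 : b.length = 0 := by omega
  simp [List.length_eq_zero_iff.mp hb0]

lemma pvMaxLen_eq_zero_of_all (m : List (List Int)) (h : ∀ b ∈ m, b = []) :
    pvMaxLen m = 0 := by
  induction m with
  | nil => rfl
  | cons b bs ih =>
    rw [pvMaxLen_cons, h b (by simp), ih (fun c hc => h c (by simp [hc]))]
    simp

lemma pvMaxLen_pos (m : List (List Int)) (h : pvMaxLen m ≠ 0) :
    m.filter (fun b => b ≠ []) ≠ [] := by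
  intro hfil
  exact h (pvMaxLen_eq_zero_of_all m (by simpa using List.filter_eq_nil_iff.mp hfil))

lemma pvMaxLen_tail (m : List (List Int)) :
    pvMaxLen (m.map (fun b => b.tail)) = pvMaxLen m - 1 := by
  induction m with
  | nil => simp [pvMaxLen]
  | cons b bs ih =>
    rw [List.map_cons, pvMaxLen_cons, pvMaxLen_cons, ih, List.length_tail]
    omega

lemma pvHeads (m : List (List Int)) :
    m.filterMap (fun b => b[0]?) = (m.filter (fun b => b ≠ [])).map (fun b => b.headD 0) := by
  induction m with
  | nil => simp
  | cons b bs ih =>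
    cases b <;> simp [ih]

lemma pvShift (m : List (List Int)) (j : Nat) :
    m.filterMap (fun b => b[j + 1]?) = (m.map (fun b => b.tail)).filterMap (fun b => b[j]?) := by
  induction m with
  | nil => simp
  | cons b bs ih =>
    cases b with
    | nil => simp [ih]
    | cons x t =>
      simp only [List.map_cons, List.tail_cons, List.filterMap_cons, List.getElem?_cons_succ, ih]

lemma pvRest (m : List (List Int)) :
    ((m.filter (fun b => b ≠ [])).filter (fun b => 1 < b.length)).map (fun b => b.tail)
      = (m.map (fun b => b.tail)).filter (fun b => b ≠ []) := by
  rw [List.filter_filter, List.filter_map]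
  apply congrArg
  apply List.filter_congr
  intro b _
  cases b with
  | nil => simp
  | cons x t => cases t <;> simp

lemma pvB_eq_cols (n : Nat) : ∀ (m : List (List Int)), pvMaxLen m = n →
    pvAltLoop (m.filter (fun b => b ≠ [])) = pvCols m n := by
  induction n with
  | zero =>
    intro m hm
    rw [pvMaxLen_zero m hm]
    simp [pvAltLoop, pvCols]
  | succ n ih =>
    intro m hm
    have hne : m.filter (fun b => b ≠ []) ≠ [] := pvMaxLen_pos m (by omega)
    obtain ⟨a, rest, hF⟩ : ∃ a rest, m.filter (fun b => b ≠ []) = a :: rest := by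
      cases hF : m.filter (fun b => b ≠ []) with
      | nil => exact absurd hF hne
      | cons a rest => exact ⟨a, rest, rfl⟩
    rw [hF, pvAltLoop.eq_def]
    simp only [pvAltStep, List.nil_append]
    rw [← hF, pvRest m]
    have hrec := ih (m.map (fun b => b.tail)) (by rw [pvMaxLen_tail, hm]; omega)
    rw [hrec]
    unfold pvCols
    rw [List.range_succ_eq_map]
    simp only [List.flatMap_cons, List.flatMap_map]
    rw [pvHeads m]
    congr 1
    apply List.flatMap_congr
    intro j _
    exact (pvShift m j).symm

-- ===== VERDICT (by name: the statement is the Claim_ definition above) =====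
theorem block_interleave_spec : Claim_equal_block_interleave := by
  intro data _
  unfold Spec_block_interleave block_interleave_alt
  rw [pvFilter_ne_nil]
  rw [pvLoop2_eq_tails 0 _ (by
    intro b hb
    have := List.of_mem_filter hb
    have hb' : b ≠ [] := by simpa using this
    cases b with
    | nil => exact absurd rfl hb'
    | cons x t => simp)]
  simp only [List.drop_zero, List.map_id']
  rw [pvB_eq_cols (pvMaxLen (data.flatMap id)) (data.flatMap id) rfl]
  exact pvA_eq_cols data
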